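-- pv_equiv track=rewrite | github.com/abhiramjoshi/cricket_analytics | codebase/analysis_functions.py | get_cumulative_dismissals
-- ===== SOURCE A (Python) =====
-- def get_cumulative_dismissals(batting_stats):
--     """Given a dict of batting stats, returns the cumulative dismissal arrays of those stats"""
--
--     dismissals = {}
--
--     for i,stat in enumerate(batting_stats):
--
--         try:
--             dismissals[stat['how_out']].append(dismissals[stat['how_out']][-1] + 1)
--         except KeyError:
--             dismissals[stat['how_out']] = [0]*i
--             dismissals[stat['how_out']].append(1)
--
--         for key in dismissals:
--             if key != stat['how_out']:
--                 dismissals[key].append(dismissals[key][-1])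
--
--     return dismissals
-- ===== SOURCE B (Python) =====
-- def _prefix_counts(hows, k):
--     """Running count of k over hows: out[i] = number of occurrences of k in hows[:i+1]."""
--     out = []
--     c = 0
--     for h in hows:
--         if h == k:
--             c += 1
--         out.append(c)
--     return out
--
-- def get_cumulative_dismissals(batting_stats):
--     """Given a dict of batting stats, returns the cumulative dismissal arrays of those stats"""
--     hows = [stat['how_out'] for stat in batting_stats]
--     seen = []
--     for h in hows:
--         if h not in seen:
--             seen.append(h)
--     return {k: _prefix_counts(hows, k) for k in seen}
-- ===== Notes on version B (the rewrite author's own statement) =====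
-- stated objective: alternative
-- what changed: Transposes the iteration: instead of A's event-major loop that lazily inserts keys via try/except-KeyError, zero-pads, reads lst[-1] and extends every key's list at each event, B collects the distinct how_out values in first-appearance order and then builds each key's whole cumulative array independently with one running-count pass per key.
import Mathlib
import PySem

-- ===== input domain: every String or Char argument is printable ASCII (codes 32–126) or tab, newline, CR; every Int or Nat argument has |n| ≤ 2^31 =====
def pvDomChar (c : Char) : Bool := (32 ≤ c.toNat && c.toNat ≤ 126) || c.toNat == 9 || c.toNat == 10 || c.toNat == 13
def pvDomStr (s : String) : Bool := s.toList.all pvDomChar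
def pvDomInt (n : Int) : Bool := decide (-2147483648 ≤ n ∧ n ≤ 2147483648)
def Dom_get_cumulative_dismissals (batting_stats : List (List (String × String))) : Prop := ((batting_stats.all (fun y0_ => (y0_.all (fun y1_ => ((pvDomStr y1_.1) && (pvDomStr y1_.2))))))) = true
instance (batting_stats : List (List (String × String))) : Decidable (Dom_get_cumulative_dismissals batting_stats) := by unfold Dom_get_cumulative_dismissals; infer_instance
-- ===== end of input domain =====

-- B transposes A's event-major loop (try/except lazy insertion, zero-padding, lst[-1] reads,
-- extending every key's list per event) into a key-major computation: collect the distinct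
-- how_out values in first-appearance order, then build each key's whole cumulative array
-- independently with one running-count pass per key.

-- ===== PORT A =====
-- stat['how_out']: first-match association-list lookup. Under Pre_ the key is always present;
-- the .getD "" default is never reached there (a missing key is Python's KeyError, excluded by Pre_).
def pvHowOut (stat : List (String × String)) : String :=
  ((PySem.Dict.mk stat).get? "how_out").getD ""

-- Python's lst[-1]: every list A reads it from is nonempty, so the .getD 0 default is never reached.
def pvLast (l : List Int) : Int := (PySem.List.pyGet? l (-1)).getD 0

def pvStepA (d : PySem.Dict String (List Int)) (p : Int × List (String × String)) :
    PySem.Dict String (List Int) :=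
  let h := pvHowOut p.2
  let d1 :=
    match d.get? h with
    | some l => d.insert h (l ++ [pvLast l + 1])                      -- try branch
    | none   => d.insert h (List.replicate p.1.toNat 0 ++ [1])        -- except KeyError branch
  d1.keys.foldl (fun d2 key =>
    if key ≠ h then d2.insert key (d2.getD key [] ++ [pvLast (d2.getD key [])]) else d2) d1

def get_cumulative_dismissals (batting_stats : List (List (String × String))) :
    List (String × List Int) :=
  ((PySem.List.enumerate batting_stats 0).foldl pvStepA PySem.Dict.empty).items

-- ===== PORT B =====
-- _prefix_counts: one running-count pass over hows for key k
def pvPrefixCounts (hows : List String) (k : String) : List Int :=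
  (hows.foldl (fun (s : List Int × Int) h =>
      let c := if h = k then s.2 + 1 else s.2
      (s.1 ++ [c], c)) ([], 0)).1

-- the 'seen' loop: distinct values in first-appearance order
def pvSeen (hows : List String) : List String :=
  hows.foldl (fun seen h => if h ∈ seen then seen else seen ++ [h]) []

def get_cumulative_dismissals_alt (batting_stats : List (List (String × String))) :
    List (String × List Int) :=
  let hows := batting_stats.map pvHowOut
  (pvSeen hows).map (fun k => (k, pvPrefixCounts hows k))

-- ===== PRECONDITION & SPEC =====
-- Pre_ excludes exactly the stats lacking a 'how_out' key, on which Python A raises KeyError.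
def Pre_get_cumulative_dismissals (batting_stats : List (List (String × String))) : Prop :=
  ∀ stat ∈ batting_stats, "how_out" ∈ stat.map Prod.fst
instance (batting_stats : List (List (String × String))) :
    Decidable (Pre_get_cumulative_dismissals batting_stats) := by
  unfold Pre_get_cumulative_dismissals; infer_instance

def pvWitness_get_cumulative_dismissals : (List (List (String × String))) :=
  [[("how_out", "bowled")], [("how_out", "lbw")], [("how_out", "bowled")]]

def Spec_get_cumulative_dismissals (batting_stats : List (List (String × String))) (out : List (String × List Int)) : Prop := out = get_cumulative_dismissals_alt batting_stats
instance (batting_stats : List (List (String × String))) (out : List (String × List Int)) : Decidable (Spec_get_cumulative_dismissals batting_stats out) := by unfold Spec_get_cumulative_dismissals; infer_instance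

-- ===== CLAIM (what is proved, stated in full; the proofs are below) =====
def Claim_equal_get_cumulative_dismissals : Prop := ∀ (batting_stats : List (List (String × String))), Dom_get_cumulative_dismissals batting_stats → Pre_get_cumulative_dismissals batting_stats → Spec_get_cumulative_dismissals batting_stats (get_cumulative_dismissals batting_stats)

-- ===== LEMMAS AND PROOFS =====

-- The common characterisation: entry i of key k's list is the count of k among the first i+1 values.
def pvCum (hows : List String) (k : String) : List Int :=
  (List.range hows.length).map (fun i => (((hows.take (i+1)).count k : Nat) : Int))

theorem pv_dedup_append (xs : List String) (h : String) :
    PySem.List.dedup (xs ++ [h]) =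
      if h ∈ xs then PySem.List.dedup xs else PySem.List.dedup xs ++ [h] := by
  simp [pysem, PySem.Set.add]

theorem pv_cum_append (xs : List String) (h k : String) :
    pvCum (xs ++ [h]) k = pvCum xs k ++ [(((xs ++ [h]).count k : Nat) : Int)] := by
  unfold pvCum
  rw [List.length_append, List.length_singleton, List.range_succ, List.map_append]
  congr 1
  · apply List.map_congr_left
    intro i hi
    rw [List.mem_range] at hi
    rw [List.take_append_of_le_length (by omega)]
  · simp only [List.map_cons, List.map_nil]
    rw [List.take_of_length_le (by simp)]

theorem pv_cum_not_mem (xs : List String) (k : String) (hk : k ∉ xs) :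
    pvCum xs k = List.replicate xs.length 0 := by
  unfold pvCum
  rw [List.eq_replicate_iff]
  constructor
  · simp
  · intro b hb
    simp only [List.mem_map] at hb
    obtain ⟨i, _, rfl⟩ := hb
    have : (xs.take (i+1)).count k = 0 := by
      rw [List.count_eq_zero]
      exact fun hmem => hk (List.mem_of_mem_take hmem)
    simp [this]

theorem pv_last_cum (xs : List String) (k : String) (hne : xs ≠ []) :
    pvLast (pvCum xs k) = ((xs.count k : Nat) : Int) := by
  obtain ⟨ys, y, rfl⟩ := (List.eq_nil_or_concat xs).resolve_left hne
  rw [List.concat_eq_append, pv_cum_append]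
  unfold pvLast
  have hlen : (pvCum ys k).length = ys.length := by simp [pvCum]
  simp [PySem.List.pyGet?, PySem.List.pyIdx?, hlen]

theorem pv_foldlA (h : String) (ks : List String) :
    ∀ (d : PySem.Dict String (List Int)), d.keys.Nodup → ks.Nodup → (∀ k ∈ ks, k ∈ d.keys) →
      (ks.foldl (fun d2 key =>
          if key ≠ h then d2.insert key (d2.getD key [] ++ [pvLast (d2.getD key [])]) else d2) d).items
        = d.items.map (fun p => if p.1 ∈ ks ∧ p.1 ≠ h then (p.1, p.2 ++ [pvLast p.2]) else p) := by
  induction ks with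
  | nil => intro d _ _ _; simp
  | cons k ks ih =>
    intro d hnd hks hsub
    rw [List.foldl_cons]
    have hknotin : k ∉ ks := (List.nodup_cons.1 hks).1
    by_cases hkh : k = h
    · subst hkh
      rw [if_neg (by simp), ih d hnd (List.nodup_cons.1 hks).2
            (fun x hx => hsub x (List.mem_cons_of_mem _ hx))]
      apply List.map_congr_left
      intro p hp
      by_cases hpk : p.1 = k
      · simp [hpk]
      · by_cases hpks : p.1 ∈ ks <;> simp [hpk, hpks]
    · rw [if_pos (by simp [hkh])]
      have hk : d.contains k = true := (PySem.Dict.contains_iff_mem_keys d k).2 (hsub k (by simp))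
      have hitems : (d.insert k (d.getD k [] ++ [pvLast (d.getD k [])])).items
          = d.items.map (fun p => if p.1 = k then (p.1, p.2 ++ [pvLast p.2]) else p) := by
        rw [PySem.Dict.items_insert_of_contains _ _ hk]
        apply List.map_congr_left
        intro p hp
        obtain ⟨p1, p2⟩ := p
        by_cases hpk : p1 = k
        · subst hpk
          have : d.getD p1 [] = p2 := PySem.Dict.getD_of_mem_items d hp hnd _
          simp [this]
        · simp [hpk]
      have hkeys : (d.insert k (d.getD k [] ++ [pvLast (d.getD k [])])).keys = d.keys :=
        PySem.Dict.keys_insert_of_contains _ _ hk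
      rw [ih _ (by rw [hkeys]; exact hnd) (List.nodup_cons.1 hks).2
            (fun x hx => by rw [hkeys]; exact hsub x (List.mem_cons_of_mem _ hx)),
          hitems, List.map_map]
      apply List.map_congr_left
      intro p hp
      by_cases hpk : p.1 = k
      · simp [Function.comp, hpk, hknotin, hkh]
      · by_cases hpks : p.1 ∈ ks <;> simp [Function.comp, hpk, hpks]

theorem pv_A_char (bs : List (List (String × String))) :
    (PySem.List.enumerate bs 0).foldl pvStepA PySem.Dict.empty
      = PySem.Dict.mk ((PySem.List.dedup (bs.map pvHowOut)).map
          (fun k => (k, pvCum (bs.map pvHowOut) k))) := by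
  induction bs using List.reverseRecOn with
  | nil => rfl
  | append_singleton bs s ih =>
    rw [PySem.List.enumerate_append, List.foldl_append, ih]
    set hows := bs.map pvHowOut with hhows
    set h := pvHowOut s with hh
    set K := PySem.List.dedup hows with hK
    have hmapb : (bs ++ [s]).map pvHowOut = hows ++ [h] := by simp [hhows, hh]
    have hKnd : K.Nodup := PySem.List.nodup_dedup hows
    have hkeysnd : (PySem.Dict.mk (K.map fun k => (k, pvCum hows k))).keys.Nodup := by
      rw [PySem.Dict.keys_mk, List.map_map]
      simpa [Function.comp_def] using hKnd
    have hkeysK : (PySem.Dict.mk (K.map fun k => (k, pvCum hows k))).keys = K := by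
      rw [PySem.Dict.keys_mk, List.map_map]; simp [Function.comp_def]
    simp only [PySem.List.enumerate_nil, PySem.List.enumerate_cons, List.foldl_cons, List.foldl_nil]
    rw [hmapb]
    by_cases hmem : h ∈ hows
    · -- existing key: the try branch fires
      have hne : hows ≠ [] := by intro e; rw [e] at hmem; simp at hmem
      have hget : (PySem.Dict.mk (K.map fun k => (k, pvCum hows k))).get? h = some (pvCum hows h) := by
        apply PySem.Dict.get?_of_mem_items _ _ hkeysnd
        exact List.mem_map_of_mem (f := fun k => (k, pvCum hows k)) ((PySem.List.mem_dedup hows h).2 hmem)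
      have hc : (PySem.Dict.mk (K.map fun k => (k, pvCum hows k))).contains h = true :=
        (PySem.Dict.contains_iff_mem_keys _ h).2 (by rw [hkeysK]; exact (PySem.List.mem_dedup hows h).2 hmem)
      unfold pvStepA
      rw [← hh]
      simp only [hget]
      set L := pvCum hows h ++ [pvLast (pvCum hows h) + 1] with hL
      set d1 := (PySem.Dict.mk (K.map fun k => (k, pvCum hows k))).insert h L with hd1
      have hd1items : d1.items = K.map (fun k => if k = h then (k, L) else (k, pvCum hows k)) := by
        rw [hd1, PySem.Dict.items_insert_of_contains _ _ hc]
        show List.map _ (List.map _ K) = _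
        rw [List.map_map]
        apply List.map_congr_left
        intro k hk
        by_cases hkh : k = h <;> simp [hkh]
      have hd1keys : d1.keys = K := by
        rw [hd1, PySem.Dict.keys_insert_of_contains _ _ hc, hkeysK]
      apply PySem.Dict.ext
      rw [hd1keys, pv_foldlA h K d1 (by rw [hd1keys]; exact hKnd) hKnd
            (fun x hx => by rw [hd1keys]; exact hx),
          hd1items, List.map_map]
      show _ = List.map _ (PySem.List.dedup (hows ++ [h]))
      rw [pv_dedup_append, if_pos hmem]
      apply List.map_congr_left
      intro k hk
      have hkmem : k ∈ hows := (PySem.List.mem_dedup hows k).1 hk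
      by_cases hkh : k = h
      · subst hkh
        simp only [Function.comp_def]
        rw [pv_cum_append]
        simp [hL, pv_last_cum hows h hne, List.count_append]
      · simp only [Function.comp_def, if_neg hkh]
        rw [pv_cum_append]
        have : (hows ++ [h]).count k = hows.count k := by
          rw [List.count_append]
          simp only [List.count_singleton]
          have : ¬ h = k := fun e => hkh e.symm
          simp [this]
        rw [this]
        simp [hk, hkh, pv_last_cum hows k hne]
    · -- new key: the except KeyError branch fires
      have hnotK : h ∉ K := fun hx => hmem ((PySem.List.mem_dedup hows h).1 hx)
      have hget : (PySem.Dict.mk (K.map fun k => (k, pvCum hows k))).get? h = none :=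
        (PySem.Dict.get?_eq_none_iff_not_mem_keys _ h).2 (by rw [hkeysK]; exact hnotK)
      have hc : (PySem.Dict.mk (K.map fun k => (k, pvCum hows k))).contains h = false :=
        Bool.eq_false_iff.2 (fun hcT =>
          hnotK (hkeysK ▸ (PySem.Dict.contains_iff_mem_keys _ h).1 hcT))
      unfold pvStepA
      rw [← hh]
      simp only [hget]
      have hlen : ((0 : Int) + (bs.length : Int)).toNat = hows.length := by simp [hhows]
      rw [hlen]
      set R := List.replicate hows.length (0 : Int) ++ [1] with hR
      set d1 := (PySem.Dict.mk (K.map fun k => (k, pvCum hows k))).insert h R with hd1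
      have hd1items : d1.items = K.map (fun k => (k, pvCum hows k)) ++ [(h, R)] :=
        PySem.Dict.items_insert_of_not_contains _ R hc
      have hd1keys : d1.keys = K ++ [h] := by
        show d1.items.map _ = _
        rw [hd1items]
        simp [Function.comp_def]
      have hnd' : (K ++ [h]).Nodup :=
        List.Nodup.append hKnd (List.nodup_singleton h) (List.disjoint_singleton.2 hnotK)
      apply PySem.Dict.ext
      rw [hd1keys, pv_foldlA h (K ++ [h]) d1 (by rw [hd1keys]; exact hnd') hnd'
            (fun x hx => by rw [hd1keys]; exact hx),
          hd1items, List.map_append, List.map_map]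
      show _ = List.map _ (PySem.List.dedup (hows ++ [h]))
      rw [pv_dedup_append, if_neg hmem, List.map_append]
      congr 1
      · apply List.map_congr_left
        intro k hk
        have hkmem : k ∈ hows := (PySem.List.mem_dedup hows k).1 hk
        have hne : hows ≠ [] := fun e => by rw [e] at hkmem; simp at hkmem
        have hkh : ¬ k = h := fun e => hmem (e ▸ hkmem)
        simp only [Function.comp_def]
        rw [pv_cum_append]
        have hcount : (hows ++ [h]).count k = hows.count k := by
          rw [List.count_append]
          simp only [List.count_singleton]
          have : ¬ h = k := fun e => hkh e.symm
          simp [this]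
        rw [hcount]
        simp [hk, hkh, pv_last_cum hows k hne]
      · simp only [List.map_cons, List.map_nil]
        have : ¬ ((h ∈ K ++ [h]) ∧ h ≠ h) := by simp
        rw [if_neg this, pv_cum_append, pv_cum_not_mem hows h hmem]
        have : (hows ++ [h]).count h = 1 := by
          rw [List.count_append, List.count_eq_zero.2 hmem]
          simp
        simp [this, hR]

theorem pv_seen_eq_dedup (hows : List String) :
    pvSeen hows = PySem.List.dedup hows := by
  unfold pvSeen
  induction hows using List.reverseRecOn with
  | nil => rfl
  | append_singleton xs h ih =>
    rw [List.foldl_append, List.foldl_cons, List.foldl_nil, ih, pv_dedup_append]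
    by_cases hmem : h ∈ xs
    · rw [if_pos hmem, if_pos ((PySem.List.mem_dedup xs h).2 hmem)]
    · rw [if_neg hmem, if_neg (fun hx => hmem ((PySem.List.mem_dedup xs h).1 hx))]

theorem pv_prefix_counts_eq (hows : List String) (k : String) :
    hows.foldl (fun (s : List Int × Int) h =>
        let c := if h = k then s.2 + 1 else s.2
        (s.1 ++ [c], c)) ([], 0)
      = (pvCum hows k, ((hows.count k : Nat) : Int)) := by
  induction hows using List.reverseRecOn with
  | nil => simp [pvCum]
  | append_singleton xs h ih =>
    rw [List.foldl_append, List.foldl_cons, List.foldl_nil, ih, pv_cum_append]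
    by_cases hkh : h = k
    · subst hkh; simp [List.count_append]
    · have hne : ¬ h = k := hkh
      simp [hne, List.count_append]

-- ===== VERDICT (by name: the statement is the Claim_ definition above) =====
theorem get_cumulative_dismissals_spec : Claim_equal_get_cumulative_dismissals := by
  intro bs _dom _pre
  show ((PySem.List.enumerate bs 0).foldl pvStepA PySem.Dict.empty).items
      = (pvSeen (bs.map pvHowOut)).map (fun k => (k, pvPrefixCounts (bs.map pvHowOut) k))
  rw [pv_A_char, pv_seen_eq_dedup]
  show (PySem.List.dedup (bs.map pvHowOut)).map _ = _
  apply List.map_congr_left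
  intro k _
  unfold pvPrefixCounts
  rw [pv_prefix_counts_eq]
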